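-- pv_equiv track=rewrite | github.com/BenjaminTMilnes/PhysicsTerminology | compiler/compile.py | addItalicTags
-- ===== SOURCE A (Python) =====
-- def addItalicTags(text):
--     n = 0
--     t = ""
--
--     for c in text:
--         if c == "*" and n == 0:
--             t += "<i>"
--             n = 1
--         elif c == "*" and n == 1:
--             t += "</i>"
--             n = 0
--         else:
--             t += c
--
--     return t
-- ===== SOURCE B (Python) =====
-- def addItalicTags(text):
--     parts = text.split("*")
--     out = parts[0]
--     open_tag = True
--     for part in parts[1:]:
--         out += "<i>" if open_tag else "</i>"
--         out += part
--         open_tag = not open_tag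
--     return out
-- ===== Notes on version B (the rewrite author's own statement) =====
-- stated objective: faster
-- what changed: Replaces the per-character state machine with a split on the asterisk character followed by rejoining the segments with alternating <i>/</i> tags toggled per segment.
import Mathlib
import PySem

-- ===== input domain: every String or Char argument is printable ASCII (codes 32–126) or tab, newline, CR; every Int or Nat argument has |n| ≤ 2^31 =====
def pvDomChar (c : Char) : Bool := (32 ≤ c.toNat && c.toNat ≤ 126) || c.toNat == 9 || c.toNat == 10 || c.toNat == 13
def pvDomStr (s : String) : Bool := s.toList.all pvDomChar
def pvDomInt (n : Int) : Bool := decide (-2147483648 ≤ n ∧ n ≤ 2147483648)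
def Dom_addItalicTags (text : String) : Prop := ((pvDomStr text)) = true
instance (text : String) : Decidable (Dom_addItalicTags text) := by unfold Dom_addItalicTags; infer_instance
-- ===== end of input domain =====

-- B replaces A's per-character state machine with split('*') + rejoin with alternating tags (idiomatic; return value only, no mutation).

-- ===== PORT A =====
-- A: single pass over the characters, integer state n (0 = outside italics, 1 = inside), string accumulator t.
def addItalicTags (text : String) : String :=
  String.ofList ((text.toList.foldl
    (fun (s : Int × List Char) c =>
      if c = '*' ∧ s.1 = 0 then (1, s.2 ++ "<i>".toList)
      else if c = '*' ∧ s.1 = 1 then (0, s.2 ++ "</i>".toList)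
      else (s.1, s.2 ++ [c]))
    ((0 : Int), ([] : List Char))).2)

-- ===== PORT B =====
-- B: split at '*' (Python str.split('*') = List.splitOn '*' on the characters), then rejoin the
-- segments, inserting an alternating tag (toggled boolean) before each segment after the first.
def addItalicTags_alt (text : String) : String :=
  let parts := text.toList.splitOn '*'
  let r := (parts.drop 1).foldl
    (fun (s : List Char × Bool) part =>
      (s.1 ++ (if s.2 then "<i>".toList else "</i>".toList) ++ part, !s.2))
    (parts.headD [], true)
  String.ofList r.1

-- ===== PRECONDITION & SPEC =====
def Spec_addItalicTags (text : String) (out : String) : Prop := out = addItalicTags_alt text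
instance (text : String) (out : String) : Decidable (Spec_addItalicTags text out) := by unfold Spec_addItalicTags; infer_instance

-- ===== CLAIM (what is proved, stated in full; the proofs are below) =====
def Claim_equal_addItalicTags : Prop := ∀ (text : String), Dom_addItalicTags text → Spec_addItalicTags text (addItalicTags text)

-- ===== LEMMAS AND PROOFS =====

-- the tag emitted for state n (A) / toggle parity (B)
def pvTag (n : Int) : List Char := if n = 0 then "<i>".toList else "</i>".toList

-- the characters contributed by the segments after the first, starting in state n
def pvRest (n : Int) : List (List Char) → List Char
  | [] => []
  | q :: qs => pvTag n ++ q ++ pvRest (1 - n) qs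

theorem pv_splitOn_ne_nil (cs : List Char) : cs.splitOn '*' ≠ [] := by
  simp [List.splitOn, List.splitOnP_ne_nil]

theorem pvA_loop (cs : List Char) : ∀ (n : Int) (acc : List Char), n = 0 ∨ n = 1 →
    (cs.foldl
      (fun (s : Int × List Char) c =>
        if c = '*' ∧ s.1 = 0 then (1, s.2 ++ "<i>".toList)
        else if c = '*' ∧ s.1 = 1 then (0, s.2 ++ "</i>".toList)
        else (s.1, s.2 ++ [c]))
      (n, acc)).2
    = acc ++ (cs.splitOn '*').headD [] ++ pvRest n ((cs.splitOn '*').tail) := by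
  induction cs with
  | nil => intro n acc _; simp [List.splitOn, pvRest]
  | cons c cs ih =>
    intro n acc hn
    obtain ⟨h, t, hsplit⟩ : ∃ h t, cs.splitOn '*' = h :: t := by
      cases hcs : cs.splitOn '*' with
      | nil => exact absurd hcs (pv_splitOn_ne_nil cs)
      | cons h t => exact ⟨h, t, rfl⟩
    by_cases hc : c = '*'
    · subst hc
      have hsc : (('*'::cs).splitOn '*') = [] :: cs.splitOn '*' := by
        simp [List.splitOn, List.splitOnP_cons]
      rcases hn with hn | hn <;> subst hn
      · have hstep : (('*'::cs).foldl
            (fun (s : Int × List Char) c =>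
              if c = '*' ∧ s.1 = 0 then (1, s.2 ++ "<i>".toList)
              else if c = '*' ∧ s.1 = 1 then (0, s.2 ++ "</i>".toList)
              else (s.1, s.2 ++ [c]))
            ((0 : Int), acc))
          = (cs.foldl
            (fun (s : Int × List Char) c =>
              if c = '*' ∧ s.1 = 0 then (1, s.2 ++ "<i>".toList)
              else if c = '*' ∧ s.1 = 1 then (0, s.2 ++ "</i>".toList)
              else (s.1, s.2 ++ [c]))
            ((1 : Int), acc ++ "<i>".toList)) := by norm_num
        rw [hstep, ih 1 (acc ++ "<i>".toList) (Or.inr rfl)]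
        simp [hsc, hsplit, pvRest, pvTag]
      · have hstep : (('*'::cs).foldl
            (fun (s : Int × List Char) c =>
              if c = '*' ∧ s.1 = 0 then (1, s.2 ++ "<i>".toList)
              else if c = '*' ∧ s.1 = 1 then (0, s.2 ++ "</i>".toList)
              else (s.1, s.2 ++ [c]))
            ((1 : Int), acc))
          = (cs.foldl
            (fun (s : Int × List Char) c =>
              if c = '*' ∧ s.1 = 0 then (1, s.2 ++ "<i>".toList)
              else if c = '*' ∧ s.1 = 1 then (0, s.2 ++ "</i>".toList)
              else (s.1, s.2 ++ [c]))
            ((0 : Int), acc ++ "</i>".toList)) := by norm_num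
        rw [hstep, ih 0 (acc ++ "</i>".toList) (Or.inl rfl)]
        simp [hsc, hsplit, pvRest, pvTag]
    · have hsp : List.splitOnP (· == '*') cs = h :: t := by
        simpa [List.splitOn] using hsplit
      have hsc : ((c::cs).splitOn '*') = (c :: h) :: t := by
        simp [List.splitOn, List.splitOnP_cons, hc, hsp]
      simp only [List.foldl_cons]
      rw [if_neg (by tauto), if_neg (by tauto)]
      rw [ih n (acc ++ [c]) hn]
      simp [hsc, hsplit]

theorem pvB_loop (qs : List (List Char)) : ∀ (acc : List Char) (b : Bool),
    (qs.foldl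
      (fun (s : List Char × Bool) part =>
        (s.1 ++ (if s.2 then "<i>".toList else "</i>".toList) ++ part, !s.2))
      (acc, b)).1
    = acc ++ pvRest (if b then 0 else 1) qs := by
  induction qs with
  | nil => intro acc b; simp [pvRest]
  | cons q qs ih =>
    intro acc b
    simp only [List.foldl_cons]
    rw [ih]
    cases b <;> simp [pvRest, pvTag]

-- ===== VERDICT (by name: the statement is the Claim_ definition above) =====
theorem addItalicTags_spec : Claim_equal_addItalicTags := by
  intro text _
  unfold Spec_addItalicTags addItalicTags addItalicTags_alt
  show String.ofList _ = String.ofList ((((text.toList.splitOn '*').drop 1).foldl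
    (fun (s : List Char × Bool) part =>
      (s.1 ++ (if s.2 then "<i>".toList else "</i>".toList) ++ part, !s.2))
    ((text.toList.splitOn '*').headD [], true)).1)
  rw [pvA_loop _ 0 [] (Or.inl rfl), pvB_loop]
  simp [List.drop_one]
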